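-- pv_equiv track=rewrite | github.com/VishwasKisaniya/python | Assignment 1/que-08.py | longest_common_consonant_subsequence
-- ===== SOURCE A (Python) =====
-- def longest_common_consonant_subsequence(str1, str2):
--     def is_consonant(char):
--         return char.isalpha() and char.lower() not in 'aeiou'
--
--     m, n = len(str1), len(str2)
--     dp = [[0] * (n + 1) for _ in range(m + 1)]
--
--     for i in range(1, m + 1):
--         for j in range(1, n + 1):
--             if is_consonant(str1[i - 1]) and is_consonant(str2[j - 1]):
--                 if str1[i - 1] == str2[j - 1]:
--                     dp[i][j] = dp[i - 1][j - 1] + 1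
--                 else:
--                     dp[i][j] = max(dp[i - 1][j], dp[i][j - 1])
--             else:
--                 dp[i][j] = max(dp[i - 1][j], dp[i][j - 1])
--
--     i, j = m, n
--     lcs = []
--     while i > 0 and j > 0:
--         if is_consonant(str1[i - 1]) and is_consonant(str2[j - 1]):
--             if str1[i - 1] == str2[j - 1]:
--                 lcs.append(str1[i - 1])
--                 i -= 1
--                 j -= 1
--             elif dp[i - 1][j] > dp[i][j - 1]:
--                 i -= 1
--             else:
--                 j -= 1
--         elif dp[i - 1][j] > dp[i][j - 1]:
--             i -= 1
--         else:
--             j -= 1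
--
--     return ''.join(reversed(lcs))
-- ===== SOURCE B (Python) =====
-- def longest_common_consonant_subsequence(str1, str2):
--     def is_consonant(char):
--         return char.isalpha() and char.lower() not in 'aeiou'
--
--     prev = [''] * (len(str2) + 1)
--     for a in str1:
--         cur = ['']
--         for j, b in enumerate(str2, 1):
--             if a == b and is_consonant(a):
--                 cur.append(prev[j - 1] + a)
--             else:
--                 up, left = prev[j], cur[j - 1]
--                 cur.append(up if len(up) > len(left) else left)
--         prev = cur
--     return prev[-1]
-- ===== Notes on version B (the rewrite author's own statement) =====
-- stated objective: simpler
-- what changed: A fills a numeric LCS-length table and then reconstructs the subsequence in a second backward traceback pass; B does a single forward pass of a string-valued DP over a rolling row (each cell stores the subsequence itself), so the traceback, the full table and the final reversal disappear.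
import Mathlib
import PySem

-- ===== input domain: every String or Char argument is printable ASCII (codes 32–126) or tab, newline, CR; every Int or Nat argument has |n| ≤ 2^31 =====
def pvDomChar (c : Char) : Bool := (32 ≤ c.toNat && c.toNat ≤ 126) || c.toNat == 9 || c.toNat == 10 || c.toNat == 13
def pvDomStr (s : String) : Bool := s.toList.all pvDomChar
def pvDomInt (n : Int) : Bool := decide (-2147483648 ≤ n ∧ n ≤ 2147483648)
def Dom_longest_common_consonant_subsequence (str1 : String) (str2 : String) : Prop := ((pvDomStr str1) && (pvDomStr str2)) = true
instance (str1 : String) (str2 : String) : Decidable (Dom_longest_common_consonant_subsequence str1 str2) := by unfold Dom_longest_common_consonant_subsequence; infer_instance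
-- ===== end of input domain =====

-- B replaces A's numeric DP table + backward traceback by a single forward pass of a
-- string-valued DP over a rolling row (no reconstruction phase); objective: simpler, not faster.

-- ===== PORT A =====
-- is_consonant (the inner helper, identical in A and B)
def isCons (c : Char) : Bool :=
  PySem.Chars.isalpha c && !(['a', 'e', 'i', 'o', 'u'].contains (PySem.Chars.lowerChar c))

-- inner loop "for j in range(1, n+1)": builds row i from the previous row,
-- carrying the value just written (dp[i][j-1]) and the suffix of the previous row from j-1 on
def rowA (a : Char) : List Char → Nat → List Nat → List Nat
  | [], _, _ => []
  | b :: bs, left, prev =>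
    let v := if isCons a && isCons b then
               (if a == b then prev.getD 0 0 + 1 else max (prev.getD 1 0) left)
             else max (prev.getD 1 0) left
    v :: rowA a bs v prev.tail

-- outer loop "for i in range(1, m+1)": each row starts with dp[i][0] = 0
def buildA (t : List Char) : List Char → List Nat → List (List Nat)
  | [], _ => []
  | a :: rest, prev =>
    let row := 0 :: rowA a t 0 prev
    row :: buildA t rest row

def dpA (s t : List Char) : List (List Nat) :=
  List.replicate (t.length + 1) 0 :: buildA t s (List.replicate (t.length + 1) 0)

-- the while loop "while i > 0 and j > 0", appending to lcs
def tbA (s t : List Char) (dp : List (List Nat)) : Nat → Nat → List Char → List Char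
  | 0, _, lcs => lcs
  | _ + 1, 0, lcs => lcs
  | i + 1, j + 1, lcs =>
    let a := s.getD i ' '
    let b := t.getD j ' '
    if isCons a && isCons b then
      if a == b then tbA s t dp i j (lcs ++ [a])
      else if (dp.getD i []).getD (j + 1) 0 > (dp.getD (i + 1) []).getD j 0 then
        tbA s t dp i (j + 1) lcs
      else tbA s t dp (i + 1) j lcs
    else if (dp.getD i []).getD (j + 1) 0 > (dp.getD (i + 1) []).getD j 0 then
      tbA s t dp i (j + 1) lcs
    else tbA s t dp (i + 1) j lcs
termination_by i j _ => (i, j)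

def longest_common_consonant_subsequence (str1 : String) (str2 : String) : String :=
  let s := str1.toList
  let t := str2.toList
  let dp := dpA s t
  String.mk ((tbA s t dp s.length t.length []).reverse)

-- ===== PORT B =====
-- inner loop: build the current row of subsequences left to right, carrying cur[j-1] and
-- the suffix of the previous row from j-1 on
def rowB (a : Char) : List Char → List Char → List (List Char) → List (List Char)
  | [], _, _ => []
  | b :: bs, left, prev =>
    let v := if a == b && isCons a then prev.getD 0 [] ++ [a]
             else if (prev.getD 1 []).length > left.length then prev.getD 1 [] else left
    v :: rowB a bs v prev.tail

def longest_common_consonant_subsequence_alt (str1 : String) (str2 : String) : String :=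
  let t := str2.toList
  let final := str1.toList.foldl (fun prev a => [] :: rowB a t [] prev)
                 (List.replicate (t.length + 1) ([] : List Char))
  String.mk (final.getLastD [])

-- ===== PRECONDITION & SPEC =====
def Spec_longest_common_consonant_subsequence (str1 : String) (str2 : String) (out : String) : Prop := out = longest_common_consonant_subsequence_alt str1 str2
instance (str1 : String) (str2 : String) (out : String) : Decidable (Spec_longest_common_consonant_subsequence str1 str2 out) := by unfold Spec_longest_common_consonant_subsequence; infer_instance

-- ===== CLAIM (what is proved, stated in full; the proofs are below) =====
def Claim_equal_longest_common_consonant_subsequence : Prop := ∀ (str1 : String) (str2 : String), Dom_longest_common_consonant_subsequence str1 str2 → Spec_longest_common_consonant_subsequence str1 str2 (longest_common_consonant_subsequence str1 str2)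

-- ===== LEMMAS AND PROOFS =====

-- mathematical reading of A's dp table: gA s t i j = dp[i][j]
def gA (s t : List Char) : Nat → Nat → Nat
  | 0, _ => 0
  | _ + 1, 0 => 0
  | i + 1, j + 1 =>
    let a := s.getD i ' '
    let b := t.getD j ' '
    if isCons a && isCons b then
      (if a == b then gA s t i j + 1 else max (gA s t i (j + 1)) (gA s t (i + 1) j))
    else max (gA s t i (j + 1)) (gA s t (i + 1) j)
termination_by i j => (i, j)

-- mathematical reading of B's table: gB s t i j = the subsequence stored in cell (i, j)
def gB (s t : List Char) : Nat → Nat → List Char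
  | 0, _ => []
  | _ + 1, 0 => []
  | i + 1, j + 1 =>
    let a := s.getD i ' '
    let b := t.getD j ' '
    if a == b && isCons a then gB s t i j ++ [a]
    else if (gB s t i (j + 1)).length > (gB s t (i + 1) j).length then gB s t i (j + 1)
    else gB s t (i + 1) j
termination_by i j => (i, j)

lemma gB_length (s t : List Char) : ∀ N i j, i + j ≤ N → (gB s t i j).length = gA s t i j := by
  intro N
  induction N with
  | zero =>
    intro i j h
    have hi : i = 0 := by omega
    subst hi
    simp [gA, gB]
  | succ N ih =>
    intro i j h
    match i, j with
    | 0, j => simp [gA, gB]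
    | i + 1, 0 => simp [gA, gB]
    | i + 1, j + 1 =>
      have h1 : i + j ≤ N := by omega
      have h2 : i + (j + 1) ≤ N := by omega
      have h3 : (i + 1) + j ≤ N := by omega
      simp only [gA, gB]
      by_cases hab : (s.getD i ' ' == t.getD j ' ') = true
      · have hab' : s.getD i ' ' = t.getD j ' ' := eq_of_beq hab
        by_cases hca : isCons (s.getD i ' ') = true
        · have hcb : isCons (t.getD j ' ') = true := hab' ▸ hca
          rw [if_pos (by rw [hab, hca]; rfl), if_pos (by rw [hca, hcb]; rfl), if_pos hab]
          simp only [List.length_append, List.length_cons, List.length_nil, ih _ _ h1]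
        · have hBc : ¬((s.getD i ' ' == t.getD j ' ' && isCons (s.getD i ' ')) = true) := by
            rw [Bool.and_eq_true]; rintro ⟨-, hc⟩; exact hca hc
          have hAc : ¬((isCons (s.getD i ' ') && isCons (t.getD j ' ')) = true) := by
            rw [Bool.and_eq_true]; rintro ⟨hc, -⟩; exact hca hc
          rw [if_neg hBc, if_neg hAc]
          split_ifs with hgt <;> simp only [ih _ _ h2, ih _ _ h3] at hgt ⊢ <;> omega
      · have hBc : ¬((s.getD i ' ' == t.getD j ' ' && isCons (s.getD i ' ')) = true) := by
          rw [Bool.and_eq_true]; rintro ⟨hc, -⟩; exact hab hc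
        rw [if_neg hBc]
        by_cases hc : (isCons (s.getD i ' ') && isCons (t.getD j ' ')) = true
        · rw [if_pos hc, if_neg hab]
          split_ifs with hgt <;> simp only [ih _ _ h2, ih _ _ h3] at hgt ⊢ <;> omega
        · rw [if_neg hc]
          split_ifs with hgt <;> simp only [ih _ _ h2, ih _ _ h3] at hgt ⊢ <;> omega

lemma rowA_cons (a b : Char) (bs : List Char) (left x y : Nat) (rest : List Nat) :
    rowA a (b :: bs) left (x :: y :: rest) =
      (if (isCons a && isCons b) = true then (if (a == b) = true then x + 1 else max y left)
       else max y left)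
      :: rowA a bs
          (if (isCons a && isCons b) = true then (if (a == b) = true then x + 1 else max y left)
           else max y left) (y :: rest) := by
  simp [rowA]

lemma rowA_spec (s t : List Char) (i : Nat) : ∀ d k, t.length - k = d →
    rowA (s.getD i ' ') (t.drop k) (gA s t (i + 1) k)
      ((List.range' k (t.length + 1 - k)).map (gA s t i))
    = (List.range' (k + 1) (t.length - k)).map (gA s t (i + 1)) := by
  intro d
  induction d with
  | zero =>
    intro k hk
    rw [List.drop_eq_nil_of_le (by omega), hk]
    simp [rowA]
  | succ d ihd =>
    intro k hk
    have hklt : k < t.length := by omega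
    have h1 : t.length + 1 - k = d + 2 := by omega
    have h2 : t.length - k = d + 1 := by omega
    have h3 : t.length - (k + 1) = d := by omega
    have h4 : t.length + 1 - (k + 1) = d + 1 := by omega
    have e1 : (List.range' k (t.length + 1 - k)).map (gA s t i)
        = gA s t i k :: gA s t i (k + 1) :: (List.range' (k + 2) d).map (gA s t i) := by
      rw [h1]
      simp [List.range'_succ]
    rw [List.drop_eq_getElem_cons hklt, e1, rowA_cons]
    have hcell : (if (isCons (s.getD i ' ') && isCons (t[k]'hklt)) = true then
          (if (s.getD i ' ' == t[k]'hklt) = true then gA s t i k + 1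
           else max (gA s t i (k + 1)) (gA s t (i + 1) k))
        else max (gA s t i (k + 1)) (gA s t (i + 1) k)) = gA s t (i + 1) (k + 1) := by
      conv_rhs => rw [gA]
      simp [List.getD_eq_getElem?_getD, List.getElem?_eq_getElem hklt]
    rw [hcell, h2]
    have e2 : (List.range' (k + 1) (d + 1)).map (gA s t (i + 1))
        = gA s t (i + 1) (k + 1) :: (List.range' (k + 2) d).map (gA s t (i + 1)) := by
      simp [List.range'_succ]
    rw [e2]
    congr 1
    have e3 : gA s t i (k + 1) :: (List.range' (k + 2) d).map (gA s t i)
        = (List.range' (k + 1) (t.length + 1 - (k + 1))).map (gA s t i) := by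
      rw [h4]
      simp [List.range'_succ]
    rw [e3, ihd (k + 1) h3, h3]

lemma range_map_gA_zero (s t : List Char) :
    (List.range (t.length + 1)).map (gA s t 0) = List.replicate (t.length + 1) 0 := by
  apply List.ext_getElem
  · simp
  · intro k h1 h2
    simp [gA]

lemma buildA_spec (s t : List Char) : ∀ d k, s.length - k = d →
    buildA t (s.drop k) ((List.range (t.length + 1)).map (gA s t k))
    = (List.range' (k + 1) (s.length - k)).map
        (fun i => (List.range (t.length + 1)).map (gA s t i)) := by
  intro d
  induction d with
  | zero =>
    intro k hk
    rw [List.drop_eq_nil_of_le (by omega), hk]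
    simp [buildA]
  | succ d ihd =>
    intro k hk
    have hklt : k < s.length := by omega
    have h2 : s.length - k = d + 1 := by omega
    have h3 : s.length - (k + 1) = d := by omega
    rw [List.drop_eq_getElem_cons hklt, h2]
    show (0 :: rowA s[k] t 0 ((List.range (t.length + 1)).map (gA s t k)))
        :: buildA t (s.drop (k + 1)) (0 :: rowA s[k] t 0 ((List.range (t.length + 1)).map (gA s t k)))
      = _
    have hrow : 0 :: rowA s[k] t 0 ((List.range (t.length + 1)).map (gA s t k))
        = (List.range (t.length + 1)).map (gA s t (k + 1)) := by
      have hr := rowA_spec s t k t.length 0 (by omega)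
      simp only [List.drop_zero, Nat.sub_zero, Nat.zero_add] at hr
      have hg0 : gA s t (k + 1) 0 = 0 := by simp [gA]
      have hsk : s.getD k ' ' = s[k] := List.getD_eq_getElem _ _ hklt
      rw [hg0, hsk, ← List.range_eq_range'] at hr
      rw [hr]
      have hsplit : List.range (t.length + 1) = 0 :: List.range' 1 t.length := by
        rw [List.range_eq_range']
        simp [List.range'_succ]
      rw [hsplit, List.map_cons, hg0]
    rw [hrow]
    have : List.range' (k + 1) (d + 1) = (k + 1) :: List.range' (k + 2) d := by
      simp [List.range'_succ]
    rw [this, List.map_cons]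
    congr 1
    have := ihd (k + 1) h3
    rwa [h3] at this

lemma dpA_spec (s t : List Char) :
    dpA s t = (List.range (s.length + 1)).map
      (fun i => (List.range (t.length + 1)).map (gA s t i)) := by
  unfold dpA
  rw [← range_map_gA_zero s t]
  have hb := buildA_spec s t s.length 0 (by omega)
  rw [List.drop_zero, Nat.sub_zero] at hb
  rw [hb]
  have hr : List.range (s.length + 1) = 0 :: List.range' 1 s.length := by
    rw [List.range_eq_range']
    simp [List.range'_succ]
  rw [hr, List.map_cons]

lemma dpA_get (s t : List Char) (i j : Nat) (hi : i ≤ s.length) (hj : j ≤ t.length) :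
    (((dpA s t).getD i []).getD j 0) = gA s t i j := by
  have hi' : i < s.length + 1 := by omega
  have hj' : j < t.length + 1 := by omega
  simp [dpA_spec, List.getD_eq_getElem?_getD, hi', hj']

lemma tbA_spec (s t : List Char) : ∀ N i j lcs, i + j ≤ N → i ≤ s.length → j ≤ t.length →
    tbA s t (dpA s t) i j lcs = lcs ++ (gB s t i j).reverse := by
  intro N
  induction N with
  | zero =>
    intro i j lcs h hi hj
    have : i = 0 := by omega
    subst this
    simp [tbA, gB]
  | succ N ih =>
    intro i j lcs h hi hj
    match i, j with
    | 0, j => simp [tbA, gB]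
    | i + 1, 0 => simp [tbA, gB]
    | i + 1, j + 1 =>
      have h1 : i + j ≤ N := by omega
      have h2 : i + (j + 1) ≤ N := by omega
      have h3 : (i + 1) + j ≤ N := by omega
      have hi' : i ≤ s.length := by omega
      have hj' : j ≤ t.length := by omega
      have e1 : (((dpA s t).getD i []).getD (j + 1) 0) = gA s t i (j + 1) :=
        dpA_get s t i (j + 1) hi' hj
      have e2 : (((dpA s t).getD (i + 1) []).getD j 0) = gA s t (i + 1) j :=
        dpA_get s t (i + 1) j hi hj'
      have l2 : (gB s t i (j + 1)).length = gA s t i (j + 1) := gB_length s t N i (j + 1) h2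
      have l3 : (gB s t (i + 1) j).length = gA s t (i + 1) j := gB_length s t N (i + 1) j h3
      simp only [tbA, gB, e1, e2]
      by_cases hab : (s.getD i ' ' == t.getD j ' ') = true
      · have hab' : s.getD i ' ' = t.getD j ' ' := eq_of_beq hab
        by_cases hca : isCons (s.getD i ' ') = true
        · have hcb : isCons (t.getD j ' ') = true := hab' ▸ hca
          rw [if_pos (by rw [hca, hcb]; rfl), if_pos hab, if_pos (by rw [hab, hca]; rfl)]
          rw [ih i j (lcs ++ [s.getD i ' ']) h1 hi' hj']
          simp
        · have hBc : ¬((s.getD i ' ' == t.getD j ' ' && isCons (s.getD i ' ')) = true) := by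
            rw [Bool.and_eq_true]; rintro ⟨-, hc⟩; exact hca hc
          have hAc : ¬((isCons (s.getD i ' ') && isCons (t.getD j ' ')) = true) := by
            rw [Bool.and_eq_true]; rintro ⟨hc, -⟩; exact hca hc
          rw [if_neg hAc, if_neg hBc]
          split_ifs with hgt hgt' hgt'
          · exact ih i (j + 1) lcs h2 hi' hj
          · rw [l2, l3] at hgt'; omega
          · rw [l2, l3] at hgt'; omega
          · exact ih (i + 1) j lcs h3 hi hj'
      · have hBc : ¬((s.getD i ' ' == t.getD j ' ' && isCons (s.getD i ' ')) = true) := by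
          rw [Bool.and_eq_true]; rintro ⟨hc, -⟩; exact hab hc
        rw [if_neg hBc]
        by_cases hc : (isCons (s.getD i ' ') && isCons (t.getD j ' ')) = true
        · rw [if_pos hc, if_neg hab]
          split_ifs with hgt hgt' hgt'
          · exact ih i (j + 1) lcs h2 hi' hj
          · rw [l2, l3] at hgt'; omega
          · rw [l2, l3] at hgt'; omega
          · exact ih (i + 1) j lcs h3 hi hj'
        · rw [if_neg hc]
          split_ifs with hgt hgt' hgt'
          · exact ih i (j + 1) lcs h2 hi' hj
          · rw [l2, l3] at hgt'; omega
          · rw [l2, l3] at hgt'; omega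
          · exact ih (i + 1) j lcs h3 hi hj'

lemma rowB_cons (a b : Char) (bs : List Char) (left x y : List Char) (rest : List (List Char)) :
    rowB a (b :: bs) left (x :: y :: rest) =
      (if (a == b && isCons a) = true then x ++ [a]
       else if y.length > left.length then y else left)
      :: rowB a bs
          (if (a == b && isCons a) = true then x ++ [a]
           else if y.length > left.length then y else left) (y :: rest) := by
  simp [rowB]

lemma rowB_spec (s t : List Char) (i : Nat) : ∀ d k, t.length - k = d →
    rowB (s.getD i ' ') (t.drop k) (gB s t (i + 1) k)
      ((List.range' k (t.length + 1 - k)).map (gB s t i))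
    = (List.range' (k + 1) (t.length - k)).map (gB s t (i + 1)) := by
  intro d
  induction d with
  | zero =>
    intro k hk
    rw [List.drop_eq_nil_of_le (by omega), hk]
    simp [rowB]
  | succ d ihd =>
    intro k hk
    have hklt : k < t.length := by omega
    have h1 : t.length + 1 - k = d + 2 := by omega
    have h2 : t.length - k = d + 1 := by omega
    have h3 : t.length - (k + 1) = d := by omega
    have h4 : t.length + 1 - (k + 1) = d + 1 := by omega
    have e1 : (List.range' k (t.length + 1 - k)).map (gB s t i)
        = gB s t i k :: gB s t i (k + 1) :: (List.range' (k + 2) d).map (gB s t i) := by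
      rw [h1]
      simp [List.range'_succ]
    rw [List.drop_eq_getElem_cons hklt, e1, rowB_cons]
    have hcell : (if (s.getD i ' ' == t[k]'hklt && isCons (s.getD i ' ')) = true then
          gB s t i k ++ [s.getD i ' ']
        else if (gB s t i (k + 1)).length > (gB s t (i + 1) k).length then gB s t i (k + 1)
        else gB s t (i + 1) k) = gB s t (i + 1) (k + 1) := by
      conv_rhs => rw [gB]
      simp [List.getD_eq_getElem?_getD, List.getElem?_eq_getElem hklt]
    rw [hcell, h2]
    have e2 : (List.range' (k + 1) (d + 1)).map (gB s t (i + 1))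
        = gB s t (i + 1) (k + 1) :: (List.range' (k + 2) d).map (gB s t (i + 1)) := by
      simp [List.range'_succ]
    rw [e2]
    congr 1
    have e3 : gB s t i (k + 1) :: (List.range' (k + 2) d).map (gB s t i)
        = (List.range' (k + 1) (t.length + 1 - (k + 1))).map (gB s t i) := by
      rw [h4]
      simp [List.range'_succ]
    rw [e3, ihd (k + 1) h3, h3]

lemma range_map_gB_zero (s t : List Char) :
    (List.range (t.length + 1)).map (gB s t 0) = List.replicate (t.length + 1) ([] : List Char) := by
  apply List.ext_getElem
  · simp
  · intro k h1 h2
    simp [gB]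

lemma foldB_spec (s t : List Char) : ∀ d k, k ≤ s.length → s.length - k = d →
    (s.drop k).foldl (fun prev a => [] :: rowB a t [] prev)
      ((List.range (t.length + 1)).map (gB s t k))
    = (List.range (t.length + 1)).map (gB s t s.length) := by
  intro d
  induction d with
  | zero =>
    intro k hk hd
    have : k = s.length := by omega
    subst this
    rw [List.drop_eq_nil_of_le (by omega)]
    simp
  | succ d ihd =>
    intro k hk hd
    have hklt : k < s.length := by omega
    rw [List.drop_eq_getElem_cons hklt, List.foldl_cons]
    have hstep : ([] : List Char) :: rowB s[k] t [] ((List.range (t.length + 1)).map (gB s t k))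
        = (List.range (t.length + 1)).map (gB s t (k + 1)) := by
      have hr := rowB_spec s t k t.length 0 (by omega)
      simp only [List.drop_zero, Nat.sub_zero, Nat.zero_add] at hr
      have hg0 : gB s t (k + 1) 0 = ([] : List Char) := by simp [gB]
      have hsk : s.getD k ' ' = s[k] := List.getD_eq_getElem _ _ hklt
      rw [hg0, hsk, ← List.range_eq_range'] at hr
      rw [hr]
      have hsplit : List.range (t.length + 1) = 0 :: List.range' 1 t.length := by
        rw [List.range_eq_range']
        simp [List.range'_succ]
      rw [hsplit, List.map_cons, hg0]
    rw [hstep]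
    exact ihd (k + 1) (by omega) (by omega)

lemma getLastD_range_map (n : Nat) (g : Nat → List Char) :
    (((List.range (n + 1)).map g).getLastD []) = g n := by
  rw [List.range_succ, List.map_append]
  simp

-- ===== VERDICT (by name: the statement is the Claim_ definition above) =====
theorem longest_common_consonant_subsequence_spec : Claim_equal_longest_common_consonant_subsequence := by
  intro str1 str2 _
  unfold Spec_longest_common_consonant_subsequence
  unfold longest_common_consonant_subsequence longest_common_consonant_subsequence_alt
  have hA := tbA_spec str1.toList str2.toList (str1.toList.length + str2.toList.length)
      str1.toList.length str2.toList.length [] (le_refl _) (le_refl _) (le_refl _)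
  have hB := foldB_spec str1.toList str2.toList str1.toList.length 0 (Nat.zero_le _) rfl
  rw [List.drop_zero, range_map_gB_zero] at hB
  dsimp only
  rw [hA, hB, getLastD_range_map]
  simp
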